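-- pv_equiv track=rewrite | github.com/tomas-rosak/rozvrhy | program.py | rozpoznani_tridy
-- ===== SOURCE A (Python) =====
-- def rozpoznani_tridy(tridy, trida, vyuka):
--     if trida == "6A":
--         for i in tridy:
--             i.append(vyuka)
--             break
--     elif trida == "6B":
--         index = 0
--         for i in tridy:
--             if index == 1:
--                 i.append(vyuka)
--                 break
--             index +=1
--     elif trida == "6C":
--         index = 0
--         for i in tridy:
--             if index == 2:
--                 i.append(vyuka)
--                 break
--             index +=1
--     elif trida == "7A":
--         index = 0
--         for i in tridy:
--             if index == 3:
--                 i.append(vyuka)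
--                 break
--             index +=1
--     elif trida == "7B":
--         index = 0
--         for i in tridy:
--             if index == 4:
--                 i.append(vyuka)
--                 break
--             index +=1
--     elif trida == "7C":
--         index = 0
--         for i in tridy:
--             if index == 5:
--                 i.append(vyuka)
--                 break
--             index +=1
--     elif trida == "8A":
--         index = 0
--         for i in tridy:
--             if index == 6:
--                 i.append(vyuka)
--                 break
--             index +=1
--     elif trida == "8B":
--         index = 0
--         for i in tridy:
--             if index == 7:
--                 i.append(vyuka)
--                 break
--             index +=1
--     elif trida == "8C":
--         index = 0
--         for i in tridy:
--             if index == 8: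
--                 i.append(vyuka)
--                 break
--             index +=1
--     elif trida == "9A":
--         index = 0
--         for i in tridy:
--             if index == 9:
--                 i.append(vyuka)
--                 break
--             index +=1
--     elif trida == "9B":
--         index = 0
--         for i in tridy:
--             if index == 10:
--                 i.append(vyuka)
--                 break
--             index +=1
--     elif trida == "9C":
--         index = 0
--         for i in tridy:
--             if index == 11:
--                 i.append(vyuka)
--                 break
--             index +=1
--     return tridy
-- ===== SOURCE B (Python) =====
-- _IDX = {"6A": 0, "6B": 1, "6C": 2, "7A": 3, "7B": 4, "7C": 5,
--         "8A": 6, "8B": 7, "8C": 8, "9A": 9, "9B": 10, "9C": 11}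
--
-- def rozpoznani_tridy(tridy, trida, vyuka):
--     idx = _IDX.get(trida)
--     if idx is not None and idx < len(tridy):
--         tridy[idx].append(vyuka)
--     return tridy
-- ===== Notes on version B (the rewrite author's own statement) =====
-- stated objective: simpler
-- what changed: Replaces the 12-branch elif chain, each with its own counting loop and break, by a single dict lookup of the class's index plus one bounds-checked direct append at that index.
import Mathlib
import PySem

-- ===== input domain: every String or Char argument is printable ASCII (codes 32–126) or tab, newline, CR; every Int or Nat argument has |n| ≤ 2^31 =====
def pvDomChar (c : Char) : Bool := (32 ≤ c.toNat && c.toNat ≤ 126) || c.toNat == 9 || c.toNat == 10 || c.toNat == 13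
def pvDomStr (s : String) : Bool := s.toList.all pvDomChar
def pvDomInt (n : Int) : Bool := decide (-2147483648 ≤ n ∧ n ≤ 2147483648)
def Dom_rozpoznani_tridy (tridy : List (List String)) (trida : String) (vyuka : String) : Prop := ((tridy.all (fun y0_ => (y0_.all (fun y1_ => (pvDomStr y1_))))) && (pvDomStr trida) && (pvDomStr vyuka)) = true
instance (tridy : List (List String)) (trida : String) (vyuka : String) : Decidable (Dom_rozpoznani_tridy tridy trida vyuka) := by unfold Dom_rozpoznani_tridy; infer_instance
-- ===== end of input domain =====

-- B replaces A's 12-branch elif chain of counting loops by one table lookup plus a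
-- bounds-checked direct append at the index (simpler). Both Pythons mutate `tridy`
-- in place identically; the equivalence proved is about the returned value.

-- ===== PORT A =====
-- A's '6A' branch: append to the first sublist and break (no-op on []).
def pvFirstA (vyuka : String) : List (List String) → List (List String)
  | [] => []
  | i :: rest => (i ++ [vyuka]) :: rest

-- A's other branches: walk the list with a counter, append at the target counter, break.
def pvLoopA (vyuka : String) : List (List String) → Nat → Nat → List (List String)
  | [], _, _ => []
  | i :: rest, index, target =>
    if index = target then (i ++ [vyuka]) :: rest
    else i :: pvLoopA vyuka rest (index + 1) target

def rozpoznani_tridy (tridy : List (List String)) (trida : String) (vyuka : String) : List (List String) :=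
  if trida == "6A" then pvFirstA vyuka tridy
  else if trida == "6B" then pvLoopA vyuka tridy 0 1
  else if trida == "6C" then pvLoopA vyuka tridy 0 2
  else if trida == "7A" then pvLoopA vyuka tridy 0 3
  else if trida == "7B" then pvLoopA vyuka tridy 0 4
  else if trida == "7C" then pvLoopA vyuka tridy 0 5
  else if trida == "8A" then pvLoopA vyuka tridy 0 6
  else if trida == "8B" then pvLoopA vyuka tridy 0 7
  else if trida == "8C" then pvLoopA vyuka tridy 0 8
  else if trida == "9A" then pvLoopA vyuka tridy 0 9
  else if trida == "9B" then pvLoopA vyuka tridy 0 10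
  else if trida == "9C" then pvLoopA vyuka tridy 0 11
  else tridy

-- ===== PORT B =====
def pvIdxTable : List (String × Nat) :=
  [("6A", 0), ("6B", 1), ("6C", 2), ("7A", 3), ("7B", 4), ("7C", 5),
   ("8A", 6), ("8B", 7), ("8C", 8), ("9A", 9), ("9B", 10), ("9C", 11)]

def rozpoznani_tridy_alt (tridy : List (List String)) (trida : String) (vyuka : String) : List (List String) :=
  match pvIdxTable.lookup trida with
  | none => tridy
  | some idx => if idx < tridy.length then tridy.modify idx (fun s => s ++ [vyuka]) else tridy

-- ===== PRECONDITION & SPEC =====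
def Spec_rozpoznani_tridy (tridy : List (List String)) (trida : String) (vyuka : String) (out : List (List String)) : Prop := out = rozpoznani_tridy_alt tridy trida vyuka
instance (tridy : List (List String)) (trida : String) (vyuka : String) (out : List (List String)) : Decidable (Spec_rozpoznani_tridy tridy trida vyuka out) := by unfold Spec_rozpoznani_tridy; infer_instance

-- ===== CLAIM (what is proved, stated in full; the proofs are below) =====
def Claim_equal_rozpoznani_tridy : Prop := ∀ (tridy : List (List String)) (trida : String) (vyuka : String), Dom_rozpoznani_tridy tridy trida vyuka → Spec_rozpoznani_tridy tridy trida vyuka (rozpoznani_tridy tridy trida vyuka)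

-- ===== LEMMAS AND PROOFS =====

-- A's counting loop from counter i looking for counter i+k is a bounds-checked modify at k.
theorem pvLoopA_eq (vyuka : String) (tridy : List (List String)) (i k : Nat) :
    pvLoopA vyuka tridy i (i + k) =
      if k < tridy.length then tridy.modify k (fun s => s ++ [vyuka]) else tridy := by
  induction tridy generalizing i k with
  | nil => simp [pvLoopA]
  | cons x rest ih =>
    cases k with
    | zero => simp [pvLoopA]
    | succ k' =>
      have h : ¬ i = i + (k' + 1) := by omega
      have := ih (i + 1) k'
      rw [show i + 1 + k' = i + (k' + 1) by omega] at this
      simp only [pvLoopA, if_neg h, this, List.modify_cons, List.length_cons]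
      by_cases hk : k' < rest.length
      · simp [hk, Nat.succ_lt_succ hk]
      · simp [hk]

theorem pvLoopA_eq0 (vyuka : String) (tridy : List (List String)) (k : Nat) :
    pvLoopA vyuka tridy 0 k =
      if k < tridy.length then tridy.modify k (fun s => s ++ [vyuka]) else tridy := by
  have := pvLoopA_eq vyuka tridy 0 k; simpa using this

theorem pvFirstA_eq (vyuka : String) (tridy : List (List String)) :
    pvFirstA vyuka tridy =
      if 0 < tridy.length then tridy.modify 0 (fun s => s ++ [vyuka]) else tridy := by
  cases tridy <;> simp [pvFirstA]

-- ===== VERDICT (by name: the statement is the Claim_ definition above) =====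
theorem rozpoznani_tridy_spec : Claim_equal_rozpoznani_tridy := by
  intro tridy trida vyuka _
  unfold Spec_rozpoznani_tridy rozpoznani_tridy rozpoznani_tridy_alt
  by_cases h1 : trida = "6A"
  · subst h1; simp only [pvIdxTable, List.lookup, BEq.rfl, String.reduceBEq, Bool.false_eq_true, if_false, if_pos, pvFirstA_eq]
  by_cases h2 : trida = "6B"
  · subst h2; simp only [pvIdxTable, List.lookup, BEq.rfl, String.reduceBEq, Bool.false_eq_true, if_false, if_pos, pvLoopA_eq0]
  by_cases h3 : trida = "6C"
  · subst h3; simp only [pvIdxTable, List.lookup, BEq.rfl, String.reduceBEq, Bool.false_eq_true, if_false, if_pos, pvLoopA_eq0]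
  by_cases h4 : trida = "7A"
  · subst h4; simp only [pvIdxTable, List.lookup, BEq.rfl, String.reduceBEq, Bool.false_eq_true, if_false, if_pos, pvLoopA_eq0]
  by_cases h5 : trida = "7B"
  · subst h5; simp only [pvIdxTable, List.lookup, BEq.rfl, String.reduceBEq, Bool.false_eq_true, if_false, if_pos, pvLoopA_eq0]
  by_cases h6 : trida = "7C"
  · subst h6; simp only [pvIdxTable, List.lookup, BEq.rfl, String.reduceBEq, Bool.false_eq_true, if_false, if_pos, pvLoopA_eq0]
  by_cases h7 : trida = "8A"
  · subst h7; simp only [pvIdxTable, List.lookup, BEq.rfl, String.reduceBEq, Bool.false_eq_true, if_false, if_pos, pvLoopA_eq0]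
  by_cases h8 : trida = "8B"
  · subst h8; simp only [pvIdxTable, List.lookup, BEq.rfl, String.reduceBEq, Bool.false_eq_true, if_false, if_pos, pvLoopA_eq0]
  by_cases h9 : trida = "8C"
  · subst h9; simp only [pvIdxTable, List.lookup, BEq.rfl, String.reduceBEq, Bool.false_eq_true, if_false, if_pos, pvLoopA_eq0]
  by_cases h10 : trida = "9A"
  · subst h10; simp only [pvIdxTable, List.lookup, BEq.rfl, String.reduceBEq, Bool.false_eq_true, if_false, if_pos, pvLoopA_eq0]
  by_cases h11 : trida = "9B"
  · subst h11; simp only [pvIdxTable, List.lookup, BEq.rfl, String.reduceBEq, Bool.false_eq_true, if_false, if_pos, pvLoopA_eq0]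
  by_cases h12 : trida = "9C"
  · subst h12; simp only [pvIdxTable, List.lookup, BEq.rfl, String.reduceBEq, Bool.false_eq_true, if_false, if_pos, pvLoopA_eq0]
  simp only [pvIdxTable, List.lookup, beq_eq_false_iff_ne.mpr h1, beq_eq_false_iff_ne.mpr h2, beq_eq_false_iff_ne.mpr h3, beq_eq_false_iff_ne.mpr h4, beq_eq_false_iff_ne.mpr h5, beq_eq_false_iff_ne.mpr h6, beq_eq_false_iff_ne.mpr h7, beq_eq_false_iff_ne.mpr h8, beq_eq_false_iff_ne.mpr h9, beq_eq_false_iff_ne.mpr h10, beq_eq_false_iff_ne.mpr h11, beq_eq_false_iff_ne.mpr h12, Bool.false_eq_true, if_false]
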